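-- pv_equiv track=rewrite | github.com/marioncandau/famfoot-scripts | classement des buteuses/generate_ranking_R2Sud.py | Get_nth_word
-- ===== SOURCE A (Python) =====
-- def Get_nth_word(ligne,nb):
--     switch = '0' ;
--     retour = "" ;
--     i_nb = 0 ;
--     for i in ligne:
--         if (i!=' '):
--             if (switch=='0'):
--                 switch='1'    ;
--                 i_nb = i_nb+1 ;
--             if (switch=='1'):
--                 if (i_nb == nb and i != '\n'):
--                     retour=retour+i ;
--         else:
--             if (switch=='1'):
--                 switch='0';
--     return retour ;
-- ===== SOURCE B (Python) =====
-- def Get_nth_word(ligne, nb):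
--     words = [w for w in ligne.split(' ') if w]
--     if 1 <= nb <= len(words):
--         return words[nb - 1].replace('\n', '')
--     return ''
-- ===== Notes on version B (the rewrite author's own statement) =====
-- stated objective: idiomatic
-- what changed: Replaces A's single-pass character state machine (switch/word-counter/accumulator) with a staged tokenize-then-index strategy: split on ' ', drop empty tokens, bounds-check nb, index the word and strip newlines.
import Mathlib
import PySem

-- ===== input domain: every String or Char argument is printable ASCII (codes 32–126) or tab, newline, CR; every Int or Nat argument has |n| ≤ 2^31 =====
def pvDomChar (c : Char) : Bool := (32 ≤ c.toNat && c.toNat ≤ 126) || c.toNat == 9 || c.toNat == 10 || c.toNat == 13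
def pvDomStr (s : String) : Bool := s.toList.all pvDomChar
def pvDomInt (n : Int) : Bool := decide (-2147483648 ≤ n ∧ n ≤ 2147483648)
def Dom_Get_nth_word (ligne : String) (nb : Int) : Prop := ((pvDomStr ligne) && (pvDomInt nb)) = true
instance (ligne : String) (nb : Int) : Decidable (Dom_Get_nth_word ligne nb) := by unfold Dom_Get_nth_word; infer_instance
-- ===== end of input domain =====

-- B replaces A's one-pass character state machine by a tokenize-then-index strategy
-- (split on ' ', drop empty tokens, bounds-check nb, index, strip newlines); same cost.

-- ===== PORT A =====
-- literal transliteration of A's for-loop: state (switch, i_nb, retour), branches in source order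
def GnwLoop (nb : Int) : List Char → Char → Int → List Char → List Char
  | [], _, _, retour => retour
  | i :: rest, switch, i_nb, retour =>
    if i ≠ ' ' then
      let st := if switch = '0' then ('1', i_nb + 1) else (switch, i_nb)
      let retour' :=
        if st.1 = '1' then
          (if st.2 = nb ∧ i ≠ '\n' then retour ++ [i] else retour)
        else retour
      GnwLoop nb rest st.1 st.2 retour'
    else
      GnwLoop nb rest (if switch = '1' then '0' else switch) i_nb retour

def Get_nth_word (ligne : String) (nb : Int) : String :=
  String.ofList (GnwLoop nb ligne.toList '0' 0 [])

-- ===== PORT B =====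
-- words = [w for w in ligne.split(' ') if w]; if 1 <= nb <= len(words): words[nb-1].replace('\n',''); else ''
def Get_nth_word_alt (ligne : String) (nb : Int) : String :=
  let words := (ligne.toList.splitOn ' ').filter (fun w => w ≠ [])
  if 1 ≤ nb ∧ nb ≤ (words.length : Int) then
    String.ofList ((words.getD (nb - 1).toNat []).filter (fun c => c ≠ '\n'))
  else ""

-- ===== PRECONDITION & SPEC =====
def Spec_Get_nth_word (ligne : String) (nb : Int) (out : String) : Prop := out = Get_nth_word_alt ligne nb
instance (ligne : String) (nb : Int) (out : String) : Decidable (Spec_Get_nth_word ligne nb out) := by unfold Spec_Get_nth_word; infer_instance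

-- ===== CLAIM =====
def Claim_equal_Get_nth_word : Prop := ∀ (ligne : String) (nb : Int), Dom_Get_nth_word ligne nb → Spec_Get_nth_word ligne nb (Get_nth_word ligne nb)

-- ===== LEMMAS AND PROOFS =====

-- the nonempty ' '-separated words of a char list
def wordsOf : List Char → List (List Char)
  | [] => []
  | c :: t =>
    if c = ' ' then wordsOf t
    else (c :: t.takeWhile (· ≠ ' ')) :: wordsOf (t.dropWhile (· ≠ ' '))
termination_by l => l.length
decreasing_by
  · simp
  · simpa using Nat.lt_succ_of_le (List.length_dropWhile_le _ _)

-- select the m-th (1-based) word, newline-stripped; [] when out of range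
def pick : Int → List (List Char) → List Char
  | _, [] => []
  | m, w :: ws => if m = 1 then w.filter (· ≠ '\n') else pick (m - 1) ws

lemma pick_of_lt_one (ws : List (List Char)) : ∀ m : Int, m < 1 → pick m ws = [] := by
  induction ws with
  | nil => intro m _; rfl
  | cons w ws ih =>
    intro m hm
    rw [pick, if_neg (by omega)]
    exact ih (m - 1) (by omega)

-- raw split on ' ' (keeps empty chunks), recursive form of List.splitOn
def rsplit : List Char → List (List Char)
  | [] => [[]]
  | c :: t => if c = ' ' then [] :: rsplit t else (rsplit t).modifyHead (c :: ·)

lemma splitOn_eq_rsplit (l : List Char) : l.splitOn ' ' = rsplit l := by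
  induction l with
  | nil => rfl
  | cons c t ih =>
    simp only [List.splitOn] at ih ⊢
    rw [List.splitOnP_cons, rsplit, ih]
    by_cases h : c = ' ' <;> simp [h]

lemma rsplit_decomp (l : List Char) :
    rsplit l = (l.takeWhile (· ≠ ' ')) :: (rsplit l).tail ∧
    (rsplit l).tail = (match l.dropWhile (· ≠ ' ') with
                       | [] => ([] : List (List Char))
                       | _ :: u => rsplit u) := by
  induction l with
  | nil => simp [rsplit]
  | cons c t ih =>
    by_cases h : c = ' '
    · subst h; simp [rsplit, List.takeWhile, List.dropWhile]
    · obtain ⟨ih1, ih2⟩ := ih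
      constructor
      · rw [rsplit, if_neg h, ih1]
        simp [List.takeWhile, h]
      · rw [rsplit, if_neg h, ih1]
        simpa [List.dropWhile, h] using ih2

lemma filter_rsplit (l : List Char) :
    (rsplit l).filter (fun w => w ≠ []) = wordsOf l := by
  induction l using wordsOf.induct with
  | case1 => simp [rsplit, wordsOf]
  | case2 t ih =>
    simpa [rsplit, wordsOf] using ih
  | case3 c t h ih =>
    obtain ⟨d1, d2⟩ := rsplit_decomp t
    rw [rsplit, if_neg h, d1]
    simp only [List.modifyHead, wordsOf, if_neg h]
    rw [List.filter_cons]
    simp only [ne_eq, reduceCtorEq, not_false_eq_true, decide_true, if_true]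
    congr 1
    rw [d2]
    cases hd : t.dropWhile (· ≠ ' ') with
    | nil => simp [wordsOf]
    | cons d u =>
      have hds : d = ' ' := by
        have h' := List.head?_dropWhile_not (fun c : Char => decide (c ≠ ' ')) t
        rw [hd] at h'; simpa using h'
      subst hds
      rw [hd] at ih
      have ih' : (rsplit u).filter (fun w => w ≠ []) = wordsOf u := by
        have e1 : rsplit (' ' :: u) = [] :: rsplit u := by simp [rsplit]
        have e2 : wordsOf (' ' :: u) = wordsOf u := by simp [wordsOf]
        rw [e1, e2] at ih
        simpa using ih
      show (rsplit u).filter (fun w => decide ¬w = []) = wordsOf (' ' :: u)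
      have e2 : wordsOf (' ' :: u) = wordsOf u := by simp [wordsOf]
      rw [e2]
      simpa using ih' 

-- A's loop, characterised by wordsOf/pick, for both switch states simultaneously
lemma loop_char (nb : Int) (l : List Char) : ∀ (k : Int) (r : List Char),
    GnwLoop nb l '0' k r = r ++ pick (nb - k) (wordsOf l) ∧
    GnwLoop nb l '1' k r =
      (if k = nb then r ++ (l.takeWhile (· ≠ ' ')).filter (· ≠ '\n') else r) ++
        pick (nb - k) (wordsOf (l.dropWhile (· ≠ ' '))) := by
  induction l with
  | nil =>
    intro k r
    simp [GnwLoop, wordsOf, pick, List.takeWhile, List.dropWhile]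
  | cons c t ih =>
    intro k r
    by_cases h : c = ' '
    · subst h
      constructor
      · simpa [GnwLoop, wordsOf] using (ih k r).1
      · simpa [GnwLoop, List.takeWhile, List.dropWhile, wordsOf] using (ih k r).1
    · constructor
      · -- switch '0', nonspace: start word k+1
        rw [GnwLoop]
        simp only [ne_eq, h, not_false_eq_true, if_true, reduceIte, Char.reduceEq]
        have h2 := (ih (k + 1) (if k + 1 = nb ∧ c ≠ '\n' then r ++ [c] else r)).2
        rw [h2]
        rw [wordsOf, if_neg h, pick]
        by_cases hk : k + 1 = nb
        · have hk' : nb - k = 1 := by omega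
          have hk2 : nb - (k + 1) = 0 := by omega
          simp only [hk, hk']
          by_cases hn : c = '\n' <;>
            simp [hn, List.append_assoc, pick_of_lt_one _ 0 (by norm_num)]
        · have hk' : nb - k ≠ 1 := by omega
          have hke : nb - (k + 1) = nb - k - 1 := by omega
          simp [hk, hk', hke]
      · -- switch '1', nonspace: continue word k
        rw [GnwLoop]
        simp only [ne_eq, h, not_false_eq_true, if_true, reduceIte, Char.reduceEq]
        have h2 := (ih k (if k = nb ∧ c ≠ '\n' then r ++ [c] else r)).2
        rw [h2]
        simp only [List.takeWhile, List.dropWhile, ne_eq, h, not_false_eq_true, decide_true]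
        by_cases hk : k = nb
        · by_cases hn : c = '\n' <;>
            simp [hk, hn]
        · simp [hk]

-- indexing form of pick
lemma pick_eq_getD (ws : List (List Char)) : ∀ m : Int,
    pick m ws = if 1 ≤ m ∧ m ≤ (ws.length : Int) then
        (ws.getD (m - 1).toNat []).filter (· ≠ '\n') else [] := by
  induction ws with
  | nil => intro m; simp [pick]
  | cons w ws ih =>
    intro m
    rw [pick]
    by_cases h1 : m = 1
    · subst h1; simp
    · rw [if_neg h1, ih (m - 1)]
      by_cases h2 : 1 ≤ m ∧ m ≤ (ws.length : Int) + 1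
      · have hm : 2 ≤ m := by omega
        rw [if_pos (show 1 ≤ m - 1 ∧ m - 1 ≤ (ws.length : Int) by omega),
            if_pos (show 1 ≤ m ∧ m ≤ ((w :: ws).length : Int) by simp only [List.length_cons]; push_cast; omega)]
        congr 1
        have ht : (m - 1).toNat = (m - 1 - 1).toNat + 1 := by omega
        rw [ht, List.getD_cons_succ]
      · rw [if_neg (by omega), if_neg (by simp only [List.length_cons]; push_cast at h2 ⊢; omega)]

-- ===== VERDICT =====
theorem Get_nth_word_spec : Claim_equal_Get_nth_word := by
  intro ligne nb _
  unfold Spec_Get_nth_word Get_nth_word Get_nth_word_alt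
  rw [(loop_char nb ligne.toList 0 []).1, List.nil_append]
  rw [splitOn_eq_rsplit, filter_rsplit, Int.sub_zero,
      pick_eq_getD (wordsOf ligne.toList) nb]
  by_cases hP : 1 ≤ nb ∧ nb ≤ (((wordsOf ligne.toList).length : Nat) : Int)
  · simp only [if_pos hP]
  · simp only [if_neg hP]
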